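-- pv_equiv track=rewrite | github.com/ryan-neubs/DSA_LeetCode_Practice | NeetCode.io/Python Solutions/Arrays_And_Hashing/bitcounter.py | getOneBits
-- ===== SOURCE A (Python) =====
-- def getOneBits(n):
--     binary = []
--     results = [0]
--     cur_num = n
--     while cur_num != 1:
--         if cur_num % 2 == 1:
--             binary.append(1)
--             results[0] = results[0] + 1
--         else:
--             binary.append(0)
--         cur_num = cur_num // 2
--
--     if cur_num == 1:
--         binary.append(1)
--         results[0] = results[0] + 1
--
--     counter = 0
--     binary.reverse()
--     while counter != len(binary):
--         if binary[counter] == 1: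
--             results.append(counter + 1)
--         counter += 1
--
--
--     return results
-- ===== SOURCE B (Python) =====
-- def getOneBits(n):
--     cur = n
--     length = 0
--     count = 0
--     ones = []  # LSB-order indices of set bits
--     while cur != 1:
--         if cur % 2 == 1:
--             count += 1
--             ones.append(length)
--         length += 1
--         cur //= 2
--     # loop only exits with cur == 1: that bit is set
--     count += 1
--     ones.append(length)
--     length += 1
--     results = [count]
--     for p in reversed(ones):
--         results.append(length - p)
--     return results
-- ===== Notes on version B (the rewrite author's own statement) =====
-- stated objective: simpler
-- what changed: One collection pass tracks only the bit length and the LSB indices of set bits, then converts each index p to the MSB position length-p arithmetically, replacing A's full bit list plus reverse plus second index scan.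
import Mathlib
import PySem

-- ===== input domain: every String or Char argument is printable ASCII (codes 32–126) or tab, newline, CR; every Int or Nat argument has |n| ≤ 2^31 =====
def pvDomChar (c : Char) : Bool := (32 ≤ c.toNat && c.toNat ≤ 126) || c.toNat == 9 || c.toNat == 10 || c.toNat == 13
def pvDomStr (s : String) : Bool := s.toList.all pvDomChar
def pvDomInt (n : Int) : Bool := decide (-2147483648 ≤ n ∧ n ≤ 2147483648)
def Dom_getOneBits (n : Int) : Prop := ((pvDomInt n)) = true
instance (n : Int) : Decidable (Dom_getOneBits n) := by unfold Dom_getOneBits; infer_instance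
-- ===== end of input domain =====

-- B does the same task in one collection pass (bit length + LSB indices of set bits) plus an
-- arithmetic index conversion, instead of A's full bit list, reverse and second scan (simpler).

-- ===== PORT A =====
-- A's first while loop: returns (binary, count, final cur_num).
-- The 'cur ≤ 0' branch is only a totality guard: Python loops forever there (outside Pre_).
def pvLoopA (cur : Int) (binary : List Int) (count : Int) : List Int × Int × Int :=
  if cur ≤ 0 then (binary, count, cur)
  else if cur = 1 then (binary, count, cur)
  else if PySem.Int.mod cur 2 == 1 then
    pvLoopA (PySem.Int.floordiv cur 2) (binary ++ [1]) (count + 1)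
  else
    pvLoopA (PySem.Int.floordiv cur 2) (binary ++ [0]) count
termination_by cur.toNat
decreasing_by all_goals
  · have h2 : (2:Int) ≤ cur := by omega
    have := PySem.Int.floordiv_eq_ediv_of_pos (a := cur) (b := 2) (by omega)
    rw [this]; omega

-- A's second while loop over the reversed bit list with an index counter.
def pvLoop2 (r : List Int) (counter : Int) (results : List Int) : List Int :=
  match r with
  | [] => results
  | x :: xs => pvLoop2 xs (counter + 1) (if x == 1 then results ++ [counter + 1] else results)

def getOneBits (n : Int) : List Int :=
  let r := pvLoopA n [] 0
  let binary := r.1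
  let count := r.2.1
  let cur := r.2.2
  let bc := if cur = 1 then (binary ++ [1], count + 1) else (binary, count)
  pvLoop2 bc.1.reverse 0 [bc.2]

-- ===== PORT B =====
-- B's single pass: returns (length, count, LSB indices of set bits).
-- Same totality guard for cur ≤ 0 (Python loops forever there, outside Pre_).
def pvLoopB (cur length count : Int) (ones : List Int) : Int × Int × List Int :=
  if cur ≤ 0 then (length, count, ones)
  else if cur = 1 then (length, count, ones)
  else if PySem.Int.mod cur 2 == 1 then
    pvLoopB (PySem.Int.floordiv cur 2) (length + 1) (count + 1) (ones ++ [length])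
  else
    pvLoopB (PySem.Int.floordiv cur 2) (length + 1) count ones
termination_by cur.toNat
decreasing_by all_goals
  · have h2 : (2:Int) ≤ cur := by omega
    have := PySem.Int.floordiv_eq_ediv_of_pos (a := cur) (b := 2) (by omega)
    rw [this]; omega

def getOneBits_alt (n : Int) : List Int :=
  let r := pvLoopB n 0 0 []
  let length := r.1 + 1
  let count := r.2.1 + 1
  let ones := r.2.2 ++ [r.1]
  count :: ones.reverse.map (fun p => length - p)

-- ===== PRECONDITION & SPEC =====
-- A's loop 'while cur_num != 1' with floor division never terminates for n ≤ 0, so A returns only on n ≥ 1.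
def Pre_getOneBits (n : Int) : Prop := 1 ≤ n
instance (n : Int) : Decidable (Pre_getOneBits n) := by unfold Pre_getOneBits; infer_instance
def pvWitness_getOneBits : Int := (6)

def Spec_getOneBits (n : Int) (out : List Int) : Prop := out = getOneBits_alt n
instance (n : Int) (out : List Int) : Decidable (Spec_getOneBits n out) := by unfold Spec_getOneBits; infer_instance

-- ===== CLAIM (what is proved, stated in full; the proofs are below) =====
def Claim_equal_getOneBits : Prop := ∀ (n : Int), Dom_getOneBits n → Pre_getOneBits n → Spec_getOneBits n (getOneBits n)

-- ===== LEMMAS AND PROOFS =====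

-- ascending indices (offset k) of entries equal to 1
def pvOnesIdx : List Int → Int → List Int
  | [], _ => []
  | x :: xs, k => (if x == 1 then [k] else []) ++ pvOnesIdx xs (k + 1)

theorem pvOnesIdx_append (a b : List Int) (k : Int) :
    pvOnesIdx (a ++ b) k = pvOnesIdx a k ++ pvOnesIdx b (k + a.length) := by
  induction a generalizing k with
  | nil => simp [pvOnesIdx]
  | cons x xs ih =>
    simp only [List.cons_append, pvOnesIdx, ih, List.length_cons, List.append_assoc]
    have e : k + 1 + (xs.length : Int) = k + ((xs.length : Nat) + 1 : Nat) := by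
      push_cast; ring
    rw [e]

theorem pvOnesIdx_shift (xs : List Int) (k : Int) :
    pvOnesIdx xs k = (pvOnesIdx xs 0).map (· + k) := by
  induction xs generalizing k with
  | nil => simp [pvOnesIdx]
  | cons x xs ih =>
    simp only [pvOnesIdx, List.map_append, zero_add]
    congr 1
    · split <;> simp
    · rw [ih (k + 1), ih 1, List.map_map]
      congr 1; funext p; simp; ring

theorem pvLoop2_char (r : List Int) (counter : Int) (results : List Int) :
    pvLoop2 r counter results = results ++ (pvOnesIdx r counter).map (· + 1) := by
  induction r generalizing counter results with
  | nil => simp [pvLoop2, pvOnesIdx]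
  | cons x xs ih =>
    simp only [pvLoop2, pvOnesIdx, ih, List.map_append]
    split <;> simp

theorem pvOnesIdx_reverse (b : List Int) :
    pvOnesIdx b.reverse 0 =
      (pvOnesIdx b 0).reverse.map (fun p => (b.length : Int) - 1 - p) := by
  induction b with
  | nil => simp [pvOnesIdx]
  | cons x xs ih =>
    rw [List.reverse_cons, pvOnesIdx_append, ih]
    simp only [pvOnesIdx, List.append_nil, List.reverse_append, List.map_append,
      List.length_reverse, List.length_cons, zero_add]
    rw [pvOnesIdx_shift xs 1]
    congr 1
    · simp only [← List.map_reverse, List.map_map]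
      congr 1; funext p; simp; ring
    · split <;> simp


-- The two collection loops run in lockstep: B's state is the length / set-bit indices of A's bit list.
theorem pvLoops_rel (cur : Int) (binary : List Int) (count : Int) :
    1 ≤ cur →
    (pvLoopB cur (binary.length : Int) count (pvOnesIdx binary 0) =
      (((pvLoopA cur binary count).1.length : Int),
       (pvLoopA cur binary count).2.1,
       pvOnesIdx (pvLoopA cur binary count).1 0) ∧
    (pvLoopA cur binary count).2.2 = 1) := by
  induction cur, binary, count using pvLoopA.induct with
  | case1 cur binary count h => intro h1; omega
  | case2 binary count h =>
    intro _
    rw [pvLoopA, pvLoopB]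
    norm_num
  | case3 cur binary count h h' hm ih =>
    intro _
    have h2 : 1 ≤ PySem.Int.floordiv cur 2 := by
      rw [PySem.Int.floordiv_eq_ediv_of_pos (by omega)]; omega
    have hA : pvLoopA cur binary count
        = pvLoopA (PySem.Int.floordiv cur 2) (binary ++ [1]) (count + 1) := by
      rw [pvLoopA, if_neg h, if_neg h', if_pos hm]
    have hB : pvLoopB cur (binary.length : Int) count (pvOnesIdx binary 0)
        = pvLoopB (PySem.Int.floordiv cur 2) ((binary.length : Int) + 1) (count + 1)
            (pvOnesIdx binary 0 ++ [(binary.length : Int)]) := by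
      rw [pvLoopB, if_neg h, if_neg h', if_pos hm]
    have e1 : (((binary ++ [1]).length : Nat) : Int) = (binary.length : Int) + 1 := by
      simp
    have e2 : pvOnesIdx (binary ++ [1]) 0 = pvOnesIdx binary 0 ++ [(binary.length : Int)] := by
      rw [pvOnesIdx_append]; simp [pvOnesIdx]
    rw [hA, hB, ← e1, ← e2]
    exact ih h2
  | case4 cur binary count h h' hm ih =>
    intro _
    have h2 : 1 ≤ PySem.Int.floordiv cur 2 := by
      rw [PySem.Int.floordiv_eq_ediv_of_pos (by omega)]; omega
    have hA : pvLoopA cur binary count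
        = pvLoopA (PySem.Int.floordiv cur 2) (binary ++ [0]) count := by
      rw [pvLoopA, if_neg h, if_neg h', if_neg hm]
    have hB : pvLoopB cur (binary.length : Int) count (pvOnesIdx binary 0)
        = pvLoopB (PySem.Int.floordiv cur 2) ((binary.length : Int) + 1) count
            (pvOnesIdx binary 0) := by
      rw [pvLoopB, if_neg h, if_neg h', if_neg hm]
    have e1 : (((binary ++ [0]).length : Nat) : Int) = (binary.length : Int) + 1 := by
      simp
    have e2 : pvOnesIdx (binary ++ [0]) 0 = pvOnesIdx binary 0 := by
      rw [pvOnesIdx_append]; simp [pvOnesIdx]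
    rw [hA, hB, ← e1]
    have := ih h2
    rw [e2] at this
    exact this

-- ===== VERDICT (by name: the statement is the Claim_ definition above) =====
theorem getOneBits_spec : Claim_equal_getOneBits := by
  intro n _ hn
  unfold Spec_getOneBits getOneBits getOneBits_alt
  obtain ⟨hB, hcur⟩ := pvLoops_rel n [] 0 hn
  simp only [List.length_nil, Int.natCast_zero, pvOnesIdx] at hB
  simp only [hB, hcur, if_true]
  rw [pvLoop2_char, pvOnesIdx_reverse, pvOnesIdx_append]
  simp only [pvOnesIdx, List.append_nil, List.map_map, List.length_append,
    List.length_cons, List.length_nil, List.singleton_append, zero_add]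
  norm_num
  intro a _
  ring
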